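-- pv_equiv track=rewrite | github.com/ravibhoraskar/aoc2023 | day13.py | reflectionindex
-- ===== SOURCE A (Python) =====
-- def reflectionindex(m):
--     for i in range(1, len(m)):
--         reflects = True
--         for j in range(0, i):
--             refindex = i + i - j - 1
--             if refindex >= len(m):
--                 continue
--             if m[j] != m[refindex]:
--                 reflects = False
--                 break
--         if reflects:
--             return i
--     return 0
-- ===== SOURCE B (Python) =====
-- def reflectionindex(m):
--     # Manacher (even centers): one O(n) pass computing the palindromic radius
--     # rad[i] of every gap i, then return the first i whose radius reaches a border.
--     n = len(m)
--     rad = [0]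
--     c, r = 0, 0
--     for i in range(1, n + 1):
--         k = min(r - i, rad[2 * c - i]) if i < r else 0
--         while k < i and i + k < n and m[i - 1 - k] == m[i + k]:
--             k += 1
--         rad.append(k)
--         if i + k > r:
--             c, r = i, i + k
--     for i in range(1, n):
--         if rad[i] >= min(i, n - i):
--             return i
--     return 0
-- ===== Notes on version B (the rewrite author's own statement) =====
-- stated objective: faster
-- what changed: Replaces A's per-split rescan of mirrored pairs (quadratic, including empty 'continue' scans past the midpoint) by a Manacher-style single pass computing the even-center palindromic radius at every gap in O(n) total work, then a scan for the first gap whose radius reaches a border.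
import Mathlib
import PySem

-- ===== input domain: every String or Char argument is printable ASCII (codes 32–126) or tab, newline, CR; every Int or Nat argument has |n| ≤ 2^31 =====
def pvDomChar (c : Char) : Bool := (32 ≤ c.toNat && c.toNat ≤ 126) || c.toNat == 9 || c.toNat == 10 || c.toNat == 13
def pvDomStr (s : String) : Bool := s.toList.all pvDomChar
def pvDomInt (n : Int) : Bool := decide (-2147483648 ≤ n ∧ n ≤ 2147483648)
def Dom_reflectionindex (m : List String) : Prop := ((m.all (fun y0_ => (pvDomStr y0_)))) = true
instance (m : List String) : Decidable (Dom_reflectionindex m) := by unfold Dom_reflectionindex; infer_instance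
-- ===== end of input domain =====

-- B replaces A's quadratic per-split rescan by a Manacher-style single pass (even-center
-- palindromic radii) followed by a scan for the first gap whose radius reaches a border.

-- ===== PORT A =====
-- inner 'for j in range(0, i)' loop: returns the final value of 'reflects' (break = immediate false)
def reflAInner (m : List String) (i : Int) : List Int → Bool
  | [] => true
  | j :: js =>
    let refindex := i + i - j - 1
    if refindex ≥ (m.length : Int) then reflAInner m i js
    else if PySem.List.pyGetD m j "" ≠ PySem.List.pyGetD m refindex "" then false
    else reflAInner m i js

-- outer 'for i in range(1, len(m))' loop with early return
def reflAOuter (m : List String) : List Int → Int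
  | [] => 0
  | i :: is =>
    if reflAInner m i (PySem.List.pyRange 0 i 1) then i else reflAOuter m is

def reflectionindex (m : List String) : Int :=
  reflAOuter m (PySem.List.pyRange 1 (m.length : Int) 1)

-- ===== PORT B =====
-- the 'while k < i and i + k < n and m[i-1-k] == m[i+k]: k += 1' loop
def manExtend (m : List String) (n i k : Int) : Int :=
  if h : k < i ∧ i + k < n ∧ PySem.List.pyGetD m (i - 1 - k) "" = PySem.List.pyGetD m (i + k) "" then
    manExtend m n i (k + 1)
  else k
termination_by (n - (i + k)).toNat
decreasing_by omega

-- one iteration of 'for i in range(1, n + 1)': state (rad, c, r)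
def manStep (m : List String) (n : Int) (st : List Int × Int × Int) (i : Int) :
    List Int × Int × Int :=
  let rad := st.1
  let c := st.2.1
  let r := st.2.2
  let k0 := if i < r then min (r - i) (PySem.List.pyGetD rad (2 * c - i) 0) else 0
  let k := manExtend m n i k0
  if i + k > r then (rad ++ [k], i, i + k) else (rad ++ [k], c, r)

-- the final 'for i in range(1, n)' scan with early return
def manScan (rad : List Int) (n : Int) : List Int → Int
  | [] => 0
  | i :: is => if PySem.List.pyGetD rad i 0 ≥ min i (n - i) then i else manScan rad n is

def reflectionindex_alt (m : List String) : Int :=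
  let n : Int := (m.length : Int)
  let st := (PySem.List.pyRange 1 (n + 1) 1).foldl (manStep m n) ([0], 0, 0)
  manScan st.1 n (PySem.List.pyRange 1 n 1)

-- ===== PRECONDITION & SPEC =====
def Spec_reflectionindex (m : List String) (out : Int) : Prop := out = reflectionindex_alt m
instance (m : List String) (out : Int) : Decidable (Spec_reflectionindex m out) := by unfold Spec_reflectionindex; infer_instance

-- ===== CLAIM (what is proved, stated in full; the proofs are below) =====
def Claim_equal_reflectionindex : Prop := ∀ (m : List String), Dom_reflectionindex m → Spec_reflectionindex m (reflectionindex m)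

-- ===== LEMMAS AND PROOFS =====

-- 'RGood m i k' : the even palindrome centered at gap i has radius at least k (and k fits)
def RGood (m : List String) (i k : Int) : Prop :=
  0 ≤ k ∧ k ≤ i ∧ k ≤ (m.length : Int) - i ∧
  ∀ j : Int, 0 ≤ j → j < k →
    PySem.List.pyGetD m (i - 1 - j) "" = PySem.List.pyGetD m (i + j) ""

-- 'RMax m i K' : K is exactly the radius (it is good, and blocked by a border or a mismatch)
def RMax (m : List String) (i K : Int) : Prop :=
  RGood m i K ∧
  (K = min i ((m.length : Int) - i) ∨
    PySem.List.pyGetD m (i - 1 - K) "" ≠ PySem.List.pyGetD m (i + K) "")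

theorem manExtend_maximal (m : List String) (i k : Int) (hg : RGood m i k) :
    RMax m i (manExtend m (m.length : Int) i k) := by
  revert hg
  fun_induction manExtend m (m.length : Int) i k with
  | case1 k h ih =>
    intro hg
    apply ih
    obtain ⟨hg0, hg1, hg2, hg3⟩ := hg
    refine ⟨by omega, by omega, by omega, fun j hj1 hj2 => ?_⟩
    by_cases hjk : j < k
    · exact hg3 j hj1 hjk
    · have : j = k := by omega
      subst this
      exact h.2.2
  | case2 k h =>
    intro hg
    refine ⟨hg, ?_⟩
    obtain ⟨hg0, hg1, hg2, hg3⟩ := hg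
    by_cases hmin : k = min i ((m.length : Int) - i)
    · exact Or.inl hmin
    · refine Or.inr ?_
      intro heq
      exact h ⟨by omega, by omega, heq⟩

-- mirror lemma: inside a good palindrome at c, the mirrored radius transfers
theorem mirror_good (m : List String) (c r i : Int)
    (hc : RGood m c (r - c)) (hci : c < i) (hir : i < r) (k' : Int)
    (hk' : RGood m (2 * c - i) k') :
    RGood m i (min (r - i) k') := by
  obtain ⟨hc0, hc1, hc2, hc3⟩ := hc
  obtain ⟨hk0, hk1, hk2, hk3⟩ := hk'
  refine ⟨by omega, by omega, by omega, fun j hj1 hj2 => ?_⟩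
  -- m[i-1-j] = m[(2c-i)+j] via the palindrome at c
  have e1 : PySem.List.pyGetD m (i - 1 - j) "" = PySem.List.pyGetD m (2 * c - i + j) "" := by
    by_cases ht : i - 1 - j - c ≥ 0
    · have := hc3 (i - 1 - j - c) (by omega) (by omega)
      rw [show c - 1 - (i - 1 - j - c) = 2 * c - i + j by ring_nf] at this
      rw [show c + (i - 1 - j - c) = i - 1 - j by ring_nf] at this
      exact this.symm
    · have := hc3 (c - i + j) (by omega) (by omega)
      rw [show c - 1 - (c - i + j) = i - 1 - j by ring_nf] at this
      rw [show c + (c - i + j) = 2 * c - i + j by ring_nf] at this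
      exact this
  -- m[i+j] = m[(2c-i)-1-j] via the palindrome at c
  have e2 : PySem.List.pyGetD m (i + j) "" = PySem.List.pyGetD m (2 * c - i - 1 - j) "" := by
    have := hc3 (i + j - c) (by omega) (by omega)
    rw [show c - 1 - (i + j - c) = 2 * c - i - 1 - j by ring_nf] at this
    rw [show c + (i + j - c) = i + j by ring_nf] at this
    exact this.symm
  -- the mirrored pair matches by the palindrome at 2c - i
  have e3 := hk3 j hj1 (by omega)
  exact e1.trans (e3.symm.trans e2.symm)

-- loop invariant for the Manacher fold
def RInv (m : List String) (st : List Int × Int × Int) (i : Int) : Prop :=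
  (st.1.length : Int) = i ∧
  (∀ x : Int, 0 ≤ x → x < i → RMax m x (PySem.List.pyGetD st.1 x 0)) ∧
  0 ≤ st.2.1 ∧ st.2.1 < i ∧ RGood m st.2.1 (st.2.2 - st.2.1)

theorem pyGetD_append_lt (xs : List Int) (y x : Int) (h0 : 0 ≤ x) (h : x < (xs.length : Int)) :
    PySem.List.pyGetD (xs ++ [y]) x 0 = PySem.List.pyGetD xs x 0 := by
  rw [PySem.List.pyGetD_eq_getElem _ _ h0 (by simp; omega),
      PySem.List.pyGetD_eq_getElem _ _ h0 h,
      List.getElem_append_left (by omega)]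

theorem pyGetD_append_self (xs : List Int) (y : Int) :
    PySem.List.pyGetD (xs ++ [y]) (xs.length : Int) 0 = y := by
  rw [PySem.List.pyGetD_eq_getElem _ _ (by omega) (by simp)]
  simp

theorem manStep_inv (m : List String) (st : List Int × Int × Int) (i : Int)
    (hi : 1 ≤ i) (hin : i ≤ (m.length : Int)) (h : RInv m st i) :
    RInv m (manStep m (m.length : Int) st i) (i + 1) := by
  obtain ⟨rad, c, r⟩ := st
  obtain ⟨hlen, hmax, hc0, hci, hgc⟩ := h
  simp only [] at hlen hmax hc0 hci hgc
  have hrc : r - c ≤ c := hgc.2.1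
  have hms : manStep m (m.length : Int) (rad, c, r) i =
      (rad ++ [manExtend m (m.length : Int) i
         (if i < r then min (r - i) (PySem.List.pyGetD rad (2 * c - i) 0) else 0)],
       if i + manExtend m (m.length : Int) i
         (if i < r then min (r - i) (PySem.List.pyGetD rad (2 * c - i) 0) else 0) > r
       then (i, i + manExtend m (m.length : Int) i
         (if i < r then min (r - i) (PySem.List.pyGetD rad (2 * c - i) 0) else 0))
       else (c, r)) := by
    by_cases hir : i < r
    · simp only [manStep, if_pos hir]
      split <;> rfl
    · simp only [manStep, if_neg hir]
      split <;> rfl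
  -- the seed is a good radius at i
  have hk0 : RGood m i (if i < r then
      min (r - i) (PySem.List.pyGetD rad (2 * c - i) 0) else 0) := by
    by_cases hir : i < r
    · rw [if_pos hir]
      exact mirror_good m c r i hgc hci hir _
        (hmax (2 * c - i) (by omega) (by omega)).1
    · rw [if_neg hir]
      exact ⟨le_refl 0, by omega, by omega, fun j hj1 hj2 => by omega⟩
  have hK := manExtend_maximal m i _ hk0
  have hKg := hK.1
  have hK0 : 0 ≤ manExtend m (m.length : Int) i
      (if i < r then min (r - i) (PySem.List.pyGetD rad (2 * c - i) 0) else 0) := hKg.1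
  rw [hms]
  refine ⟨by simp; omega, ?_, ?_⟩
  · intro x hx1 hx2
    simp only []
    by_cases hxi : x < i
    · rw [pyGetD_append_lt _ _ _ hx1 (by omega)]
      exact hmax x hx1 hxi
    · have hxx : x = i := by omega
      subst hxx
      rw [show x = (rad.length : Int) from by omega, pyGetD_append_self,
          show ((rad.length : Int)) = x from by omega]
      exact hK
  · by_cases hgt : i + manExtend m (m.length : Int) i
        (if i < r then min (r - i) (PySem.List.pyGetD rad (2 * c - i) 0) else 0) > r
    · rw [if_pos hgt]
      refine ⟨show (0:Int) ≤ i from by omega, show i < i + 1 from by omega, ?_⟩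
      show RGood m i (i + manExtend m (m.length : Int) i
        (if i < r then min (r - i) (PySem.List.pyGetD rad (2 * c - i) 0) else 0) - i)
      rw [show ∀ a : Int, i + a - i = a from fun a => by ring]
      exact hKg
    · rw [if_neg hgt]
      exact ⟨hc0, show c < i + 1 from by omega, hgc⟩

theorem inv_init (m : List String) : RInv m ([0], 0, 0) 1 := by
  refine ⟨by simp, ?_, le_refl 0, show (0:Int) < 1 from by omega, ?_⟩
  · intro x hx1 hx2
    have hx : x = 0 := by omega
    subst hx
    rw [PySem.List.pyGetD_zero_cons]
    exact ⟨⟨le_refl 0, le_refl 0, by omega, fun j hj1 hj2 => by omega⟩, Or.inl (by omega)⟩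
  · show RGood m 0 (0 - 0)
    rw [show (0:Int) - 0 = 0 from by ring]
    exact ⟨le_refl 0, le_refl 0, by omega, fun j hj1 hj2 => by omega⟩

theorem fold_inv_aux (m : List String) (i : Int) (st : List Int × Int × Int)
    (h1 : 1 ≤ i) (hle : i ≤ (m.length : Int) + 1) (hinv : RInv m st i) :
    RInv m ((PySem.List.pyRange i ((m.length : Int) + 1) 1).foldl
      (manStep m (m.length : Int)) st) ((m.length : Int) + 1) := by
  by_cases hend : (m.length : Int) + 1 ≤ i
  · rw [PySem.List.pyRange_one_eq_nil hend]
    have : i = (m.length : Int) + 1 := by omega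
    subst this
    exact hinv
  · rw [PySem.List.pyRange_one_cons (by omega)]
    rw [List.foldl_cons]
    exact fold_inv_aux m (i + 1) _ (by omega) (by omega)
      (manStep_inv m st i h1 (by omega) hinv)
termination_by ((m.length : Int) + 1 - i).toNat
decreasing_by omega

theorem fold_inv (m : List String) :
    RInv m ((PySem.List.pyRange 1 ((m.length : Int) + 1) 1).foldl
      (manStep m (m.length : Int)) ([0], 0, 0)) ((m.length : Int) + 1) := by
  exact fold_inv_aux m 1 ([0], 0, 0) (le_refl 1) (by omega) (inv_init m)

-- A's inner loop is an 'all' over the index list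
theorem reflAInner_eq_all (m : List String) (i : Int) (L : List Int) :
    reflAInner m i L =
      L.all (fun j => decide (i + i - j - 1 ≥ (m.length : Int)) ||
        (PySem.List.pyGetD m j "" == PySem.List.pyGetD m (i + i - j - 1) "")) := by
  induction L with
  | nil => rfl
  | cons j js ih =>
    simp only [reflAInner, List.all_cons]
    by_cases h1 : i + i - j - 1 ≥ (m.length : Int)
    · simp [h1, ih]
    · by_cases h2 : PySem.List.pyGetD m j "" = PySem.List.pyGetD m (i + i - j - 1) ""
      · simp [h1, h2, ih]
      · simp [h1, h2]

-- pointwise form of A's condition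
theorem reflAInner_iff (m : List String) (i : Int) :
    reflAInner m i (PySem.List.pyRange 0 i 1) = true ↔
      ∀ j : Int, 0 ≤ j → j < i → i + i - j - 1 < (m.length : Int) →
        PySem.List.pyGetD m j "" = PySem.List.pyGetD m (i + i - j - 1) "" := by
  rw [reflAInner_eq_all]
  simp only [List.all_eq_true, PySem.List.mem_pyRange_one]
  constructor
  · intro h j h0 hi hlt
    have := h j ⟨h0, hi⟩
    simp only [Bool.or_eq_true, decide_eq_true_eq, beq_iff_eq] at this
    rcases this with h' | h'
    · omega
    · exact h'
  · intro h j hj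
    simp only [Bool.or_eq_true, decide_eq_true_eq, beq_iff_eq]
    by_cases hlt : i + i - j - 1 < (m.length : Int)
    · exact Or.inr (h j hj.1 hj.2 hlt)
    · exact Or.inl (by omega)

-- A's reflects condition ⟺ the palindrome at i reaches a border
theorem reflects_iff_good (m : List String) (i : Int) (h1 : 1 ≤ i) (h2 : i < (m.length : Int)) :
    reflAInner m i (PySem.List.pyRange 0 i 1) = true ↔
      RGood m i (min i ((m.length : Int) - i)) := by
  rw [reflAInner_iff]
  constructor
  · intro h
    refine ⟨by omega, by omega, by omega, fun j hj1 hj2 => ?_⟩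
    have := h (i - 1 - j) (by omega) (by omega) (by omega)
    rw [show i + i - (i - 1 - j) - 1 = i + j by ring_nf] at this
    exact this
  · intro ⟨_, _, _, h4⟩ j hj1 hj2 hlt
    have := h4 (i - 1 - j) (by omega) (by omega)
    rw [show i - 1 - (i - 1 - j) = j by ring_nf] at this
    rw [show i + (i - 1 - j) = i + i - j - 1 by ring_nf] at this
    exact this

-- RMax K : K ≥ min ⟺ the full palindrome is good
theorem rmax_ge_iff (m : List String) (i K : Int) (hK : RMax m i K)
    (_h1 : 1 ≤ i) (_h2 : i < (m.length : Int)) :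
    (K ≥ min i ((m.length : Int) - i)) ↔ RGood m i (min i ((m.length : Int) - i)) := by
  obtain ⟨⟨hK0, hK1, hK2, hK3⟩, hstop⟩ := hK
  constructor
  · intro hge
    have : K = min i ((m.length : Int) - i) := by omega
    subst this
    exact ⟨hK0, hK1, hK2, hK3⟩
  · intro ⟨_, _, _, h4⟩
    by_contra hlt
    rcases hstop with h | h
    · omega
    · exact h (h4 K hK0 (by omega))

-- the two final scans agree
theorem scan_eq (m : List String) (rad : List Int)
    (hrad : ∀ x : Int, 0 ≤ x → x < (m.length : Int) + 1 → RMax m x (PySem.List.pyGetD rad x 0))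
    (L : List Int) (hL : ∀ i ∈ L, 1 ≤ i ∧ i < (m.length : Int)) :
    reflAOuter m L = manScan rad (m.length : Int) L := by
  induction L with
  | nil => rfl
  | cons i is ih =>
    have hi := hL i (by simp)
    have hK := hrad i (by omega) (by omega)
    simp only [reflAOuter, manScan]
    have hcond : (reflAInner m i (PySem.List.pyRange 0 i 1) = true) ↔
        (PySem.List.pyGetD rad i 0 ≥ min i ((m.length : Int) - i)) := by
      rw [reflects_iff_good m i hi.1 hi.2, ← rmax_ge_iff m i _ hK hi.1 hi.2]
    by_cases h : PySem.List.pyGetD rad i 0 ≥ min i ((m.length : Int) - i)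
    · rw [if_pos (hcond.mpr h), if_pos h]
    · rw [if_neg (fun hh => h (hcond.mp hh)), if_neg h]
      exact ih (fun j hj => hL j (by simp [hj]))

-- ===== VERDICT (by name: the statement is the Claim_ definition above) =====
theorem reflectionindex_spec : Claim_equal_reflectionindex := by
  intro m _
  unfold Spec_reflectionindex reflectionindex reflectionindex_alt
  have hinv := fold_inv m
  exact scan_eq m _ (fun x hx1 hx2 => hinv.2.1 x hx1 hx2) _
    (fun i hi => by rw [PySem.List.mem_pyRange_one] at hi; exact hi)
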